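-- pv_equiv track=rewrite | github.com/MrBrantCode/unitest_baseline | mut_generate/mist_test_cf/cf_2278/solution.py | replace_second_smallest_prime
-- ===== SOURCE A (Python) =====
-- import math
--
-- def is_prime(num):
--     if num < 2:
--         return False
--     for i in range(2, int(math.sqrt(num)) + 1):
--         if num % i == 0:
--             return False
--     return True
--
-- def replace_second_smallest_prime(arr):
--     smallest_prime = float('inf')
--     second_smallest_prime = float('inf')
--     prime_sum = 0
--
--     for num in arr:
--         if is_prime(num):
--             prime_sum += num
--             if num < smallest_prime:
--                 second_smallest_prime = smallest_prime
--                 smallest_prime = num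
--             elif num < second_smallest_prime and num != smallest_prime:
--                 second_smallest_prime = num
--
--     if second_smallest_prime != float('inf'):
--         for i in range(len(arr)):
--             if arr[i] == second_smallest_prime:
--                 arr[i] = prime_sum
--
--     return arr
-- ===== SOURCE B (Python) =====
-- import math
--
-- def is_prime(num):
--     return num >= 2 and all(num % i != 0 for i in range(2, math.isqrt(num) + 1))
--
-- def replace_second_smallest_prime(arr):
--     primes = [x for x in arr if is_prime(x)]
--     prime_sum = sum(primes)
--     uniq = sorted(set(primes))
--     if len(uniq) >= 2:
--         second = uniq[1]
--         for i in range(len(arr)):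
--             if arr[i] == second:
--                 arr[i] = prime_sum
--     return arr
-- ===== Notes on version B (the rewrite author's own statement) =====
-- stated objective: simpler
-- what changed: Replaces the running smallest/second-smallest tracking with a collect-then-sort decomposition: filter the primes, sum them, take the second element of sorted(set(primes)), then rewrite the array in place.
import Mathlib
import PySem

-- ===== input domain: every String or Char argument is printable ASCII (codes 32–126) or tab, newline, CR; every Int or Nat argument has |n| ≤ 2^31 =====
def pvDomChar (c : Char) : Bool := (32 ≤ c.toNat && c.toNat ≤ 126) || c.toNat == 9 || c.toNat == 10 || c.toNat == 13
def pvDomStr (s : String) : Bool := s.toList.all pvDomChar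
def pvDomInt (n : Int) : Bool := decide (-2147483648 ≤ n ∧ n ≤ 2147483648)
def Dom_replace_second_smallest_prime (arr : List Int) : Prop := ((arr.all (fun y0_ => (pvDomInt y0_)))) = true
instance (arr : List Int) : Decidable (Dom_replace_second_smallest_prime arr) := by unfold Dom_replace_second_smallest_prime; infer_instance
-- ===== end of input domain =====

-- B replaces A's running smallest/second-smallest tracking by a collect-then-sort decomposition
-- (simpler); both mutate arr in place in Python — the equivalence proved here is about the return value.

-- ===== PORT A =====
-- is_prime: early-return trial-division loop (int(math.sqrt(num)) = Nat.sqrt, exact on the domain)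
def pvALoop (num : Int) : List Int → Bool
  | [] => true
  | i :: rest => if PySem.Int.mod num i == 0 then false else pvALoop num rest

def pvIsPrime (num : Int) : Bool :=
  if num < 2 then false
  else pvALoop num (PySem.List.pyRange 2 ((num.toNat.sqrt : Int) + 1) 1)

-- the body of A's for-loop over arr (state = (smallest_prime, second_smallest_prime, prime_sum),
-- float('inf') modelled as none)
def pvStep (st : Option Int × Option Int × Int) (num : Int) : Option Int × Option Int × Int :=
  if pvIsPrime num then
    let psum := st.2.2 + num
    if (match st.1 with | none => true | some s => decide (num < s)) then
      (some num, st.1, psum)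
    else if ((match st.2.1 with | none => true | some s => decide (num < s))
             && (match st.1 with | none => true | some s => decide (num ≠ s))) then
      (st.1, some num, psum)
    else (st.1, st.2.1, psum)
  else st

def replace_second_smallest_prime (arr : List Int) : List Int :=
  let st := arr.foldl pvStep ((none : Option Int), (none : Option Int), (0 : Int))
  match st.2.1 with
  | none => arr
  | some sec => arr.map (fun x => if x == sec then st.2.2 else x)

-- ===== PORT B =====
-- is_prime: num >= 2 and all(num % i != 0 for i in range(2, isqrt(num)+1))
def pvIsPrimeAlt (num : Int) : Bool :=
  decide (2 ≤ num) && (PySem.List.pyRange 2 ((num.toNat.sqrt : Int) + 1) 1).all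
    (fun i => !(PySem.Int.mod num i == 0))

def replace_second_smallest_prime_alt (arr : List Int) : List Int :=
  let primes := arr.filter (fun x => pvIsPrimeAlt x)
  let primeSum := primes.sum
  let uniq := PySem.List.sorted (PySem.Set.ofList primes) (fun x => x) false
  match uniq with
  | _ :: second :: _ => arr.map (fun x => if x == second then primeSum else x)
  | _ => arr

-- ===== PRECONDITION & SPEC =====
def Spec_replace_second_smallest_prime (arr : List Int) (out : List Int) : Prop := out = replace_second_smallest_prime_alt arr
instance (arr : List Int) (out : List Int) : Decidable (Spec_replace_second_smallest_prime arr out) := by unfold Spec_replace_second_smallest_prime; infer_instance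

-- ===== CLAIM (what is proved, stated in full; the proofs are below) =====
def Claim_equal_replace_second_smallest_prime : Prop := ∀ (arr : List Int), Dom_replace_second_smallest_prime arr → Spec_replace_second_smallest_prime arr (replace_second_smallest_prime arr)

-- ===== LEMMAS AND PROOFS =====

-- proof helpers: ordered duplicate-skipping insertion, and the sorted distinct primes of a list
def pvOins (x : Int) : List Int → List Int
  | [] => [x]
  | y :: ys => if x < y then x :: y :: ys else if x = y then y :: ys else y :: pvOins x ys

def pvSds (l : List Int) : List Int :=
  l.foldl (fun s n => if pvIsPrime n then pvOins n s else s) []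

def pvFirst2 : List Int → Option Int × Option Int
  | [] => (none, none)
  | [a] => (some a, none)
  | a :: b :: _ => (some a, some b)

theorem pvALoop_eq_all (num : Int) (r : List Int) :
    pvALoop num r = r.all (fun i => !(PySem.Int.mod num i == 0)) := by
  induction r with
  | nil => rfl
  | cons i rest ih => by_cases h : PySem.Int.mod num i == 0 <;> simp [pvALoop, h, ih]

theorem pvIsPrime_eq_alt (num : Int) : pvIsPrime num = pvIsPrimeAlt num := by
  unfold pvIsPrime pvIsPrimeAlt
  rw [pvALoop_eq_all]
  by_cases h : num < 2
  · have h2 : ¬ ((2:Int) ≤ num) := by omega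
    simp [h, h2]
  · have h2 : (2:Int) ≤ num := by omega
    simp [h, h2]

theorem mem_pvOins (x y : Int) (s : List Int) : y ∈ pvOins x s ↔ y = x ∨ y ∈ s := by
  induction s with
  | nil => simp [pvOins]
  | cons a t ih =>
    unfold pvOins
    split_ifs with h1 h2 <;> (simp_all; try tauto)

theorem pairwise_pvOins (x : Int) (s : List Int) (hs : s.Pairwise (· < ·)) :
    (pvOins x s).Pairwise (· < ·) := by
  induction s with
  | nil => simp [pvOins]
  | cons a t ih =>
    rw [List.pairwise_cons] at hs
    unfold pvOins
    split_ifs with h1 h2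
    · refine List.pairwise_cons.mpr ⟨?_, List.pairwise_cons.mpr hs⟩
      intro y hy
      simp at hy
      rcases hy with rfl | hy
      · omega
      · exact lt_trans h1 (hs.1 y hy)
    · exact List.pairwise_cons.mpr hs
    · refine List.pairwise_cons.mpr ⟨?_, ih hs.2⟩
      intro y hy
      rw [mem_pvOins] at hy
      rcases hy with rfl | hy
      · omega
      · exact hs.1 y hy

theorem pvSds_append (l : List Int) (x : Int) :
    pvSds (l ++ [x]) = if pvIsPrime x then pvOins x (pvSds l) else pvSds l := by
  simp [pvSds, List.foldl_append]

theorem pairwise_pvSds (l : List Int) : (pvSds l).Pairwise (· < ·) := by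
  induction l using List.reverseRecOn with
  | nil => simp [pvSds]
  | append_singleton l x ih =>
    rw [pvSds_append]
    split_ifs
    · exact pairwise_pvOins x _ ih
    · exact ih

theorem mem_pvSds (l : List Int) (y : Int) : y ∈ pvSds l ↔ y ∈ l ∧ pvIsPrime y = true := by
  induction l using List.reverseRecOn with
  | nil => simp [pvSds]
  | append_singleton l x ih =>
    rw [pvSds_append]
    split_ifs with h
    · rw [mem_pvOins]
      simp [ih]
      constructor
      · rintro (rfl | ⟨hy, hp⟩) <;> tauto
      · rintro ⟨hy | rfl, hp⟩ <;> tauto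
    · rw [ih]
      constructor
      · rintro ⟨hy, hp⟩; exact ⟨List.mem_append_left _ hy, hp⟩
      · rintro ⟨hy, hp⟩
        rcases List.mem_append.mp hy with hy | hy
        · exact ⟨hy, hp⟩
        · simp at hy; subst hy; exact absurd hp (by simp [h])

theorem pvFold_spec (l : List Int) :
    l.foldl pvStep ((none : Option Int), (none : Option Int), (0 : Int)) =
      ((pvFirst2 (pvSds l)).1, (pvFirst2 (pvSds l)).2,
        (l.filter (fun x => pvIsPrime x)).sum) := by
  induction l using List.reverseRecOn with
  | nil => simp [pvSds, pvFirst2]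
  | append_singleton l x ih =>
    rw [List.foldl_append, pvSds_append]
    simp only [List.foldl_cons, List.foldl_nil, ih]
    have hsum : (List.filter (fun x => pvIsPrime x) (l ++ [x])).sum =
        (List.filter (fun x => pvIsPrime x) l).sum + (if pvIsPrime x then x else 0) := by
      by_cases hp : pvIsPrime x <;> simp [List.filter_append, hp]
    rw [hsum]
    by_cases hp : pvIsPrime x
    · simp only [hp, if_true]
      rcases pvSds l with _ | ⟨a, _ | ⟨b, t⟩⟩ <;>
        simp only [pvStep, hp, if_true, pvFirst2, pvOins] <;>
        split_ifs <;>
        simp_all [pvFirst2]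
    · simp [pvStep, hp]

theorem pvUniq_eq_sds (l : List Int) :
    PySem.List.sorted (PySem.Set.ofList (l.filter (fun x => pvIsPrime x))) (fun x => x) false
      = pvSds l := by
  apply PySem.List.sorted_eq_of_perm_of_pairwise_lt
  · rw [List.perm_ext_iff_of_nodup ((pairwise_pvSds l).imp (fun h => ne_of_lt h))
        (PySem.Set.nodup_ofList _)]
    intro y
    rw [mem_pvSds, PySem.Set.mem_ofList, List.mem_filter]
  · exact (pairwise_pvSds l).imp (fun h => h)

-- ===== VERDICT (by name: the statement is the Claim_ definition above) =====
theorem replace_second_smallest_prime_spec : Claim_equal_replace_second_smallest_prime := by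
  intro arr _
  unfold Spec_replace_second_smallest_prime replace_second_smallest_prime replace_second_smallest_prime_alt
  have hfilt : arr.filter (fun x => pvIsPrimeAlt x) = arr.filter (fun x => pvIsPrime x) := by
    simp [pvIsPrime_eq_alt]
  simp only [pvFold_spec, hfilt, pvUniq_eq_sds]
  rcases pvSds arr with _ | ⟨a, _ | ⟨b, t⟩⟩ <;> simp [pvFirst2]
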